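-- pv_equiv track=rewrite | github.com/rbgksqkr/TIL | 프로그래머스/lv1/118666. 성격 유형 검사하기/성격 유형 검사하기.py | solution
-- ===== SOURCE A (Python) =====
-- def solution(survey, choices):
--     answer = ''
--     total = {"R":0, "T": 0, "C":0, "F": 0, "J":0, "M": 0, "A":0, "N": 0}
--
--     for idx, question in enumerate(survey):
--         currentChoice = choices[idx]
--         if currentChoice == 1 or currentChoice == 7:
--             score = 3
--             if currentChoice > 4:
--                 total[question[1]] += score
--             else:
--                 total[question[0]] += score
--         if currentChoice == 2 or currentChoice == 6:
--             score = 2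
--             if currentChoice > 4:
--                 total[question[1]] += score
--             else:
--                 total[question[0]] += score
--         if currentChoice == 3 or currentChoice == 5:
--             score = 1
--             if currentChoice > 4:
--                 total[question[1]] += score
--             else:
--                 total[question[0]] += score
--     total_list = list(total.items())
--     for i in range(0, len(total_list), 2):
--         if total_list[i][1] >= total_list[i+1][1]:
--             answer += total_list[i][0]
--         else:
--             answer += total_list[i+1][0]
--
--     return answer
-- ===== SOURCE B (Python) =====
-- # Staged per-pair passes: for each of the four personality pairs, a separate
-- # scan of (survey, choices) computes the pair's signed net score directly; no
-- # dict, no per-letter counters, no pairing pass over dict items.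
-- def solution(survey, choices):
--     def net(a, b):
--         s = 0
--         for q, c in zip(survey, choices):
--             if 1 <= c <= 7 and c != 4:
--                 letter = q[0] if c < 4 else q[1]
--                 w = 4 - c if c < 4 else c - 4
--                 if letter == a:
--                     s += w
--                 elif letter == b:
--                     s -= w
--         return s
--     return ''.join(a if net(a, b) >= 0 else b for a, b in ("RT", "CF", "JM", "AN"))
-- ===== Notes on version B (the rewrite author's own statement) =====
-- stated objective: alternative
-- what changed: Replaces A's single pass maintaining eight per-letter counters in a dict (three score-case if-blocks) plus a second pairing pass over dict items by four independent staged passes, one per personality pair, each computing that pair's signed net score directly with no dict or counters and deciding the letter by a sign test.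
import Mathlib
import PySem

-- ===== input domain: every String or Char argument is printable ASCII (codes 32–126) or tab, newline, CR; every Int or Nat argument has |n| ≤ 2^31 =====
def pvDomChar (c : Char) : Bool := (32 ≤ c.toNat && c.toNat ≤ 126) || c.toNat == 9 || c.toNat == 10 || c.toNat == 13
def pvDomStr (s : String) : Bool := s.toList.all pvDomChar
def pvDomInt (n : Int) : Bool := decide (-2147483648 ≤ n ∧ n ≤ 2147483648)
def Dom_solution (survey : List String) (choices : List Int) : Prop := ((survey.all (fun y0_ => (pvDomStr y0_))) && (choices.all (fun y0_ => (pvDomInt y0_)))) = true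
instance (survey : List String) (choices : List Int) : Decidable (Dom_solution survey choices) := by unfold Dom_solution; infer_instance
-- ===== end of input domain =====

-- B replaces A's single pass over eight per-letter dict counters plus a pairing
-- pass over dict items by four staged per-pair passes, each computing that
-- pair's signed net score directly: an alternative decomposition.

-- ===== PORT A =====
-- the loop body of A's 'for idx, question in enumerate(survey)' loop
def pvStepA (choices : List Int) (total : PySem.Dict Char Int) (p : Int × String) : PySem.Dict Char Int :=
  let question := p.2
  let currentChoice := PySem.List.pyGetD choices p.1 0   -- choices[idx]; in range under Pre_
  let total :=
    if currentChoice == 1 || currentChoice == 7 then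
      if currentChoice > 4 then total.modify ((PySem.Str.pyGet? question 1).getD ' ') 0 (· + 3)
      else total.modify ((PySem.Str.pyGet? question 0).getD ' ') 0 (· + 3)
    else total
  let total :=
    if currentChoice == 2 || currentChoice == 6 then
      if currentChoice > 4 then total.modify ((PySem.Str.pyGet? question 1).getD ' ') 0 (· + 2)
      else total.modify ((PySem.Str.pyGet? question 0).getD ' ') 0 (· + 2)
    else total
  if currentChoice == 3 || currentChoice == 5 then
    if currentChoice > 4 then total.modify ((PySem.Str.pyGet? question 1).getD ' ') 0 (· + 1)
    else total.modify ((PySem.Str.pyGet? question 0).getD ' ') 0 (· + 1)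
  else total

def solution (survey : List String) (choices : List Int) : String :=
  let answer : List Char := []
  let total : PySem.Dict Char Int :=
    PySem.Dict.ofList [('R',0),('T',0),('C',0),('F',0),('J',0),('M',0),('A',0),('N',0)]
  let total := (PySem.List.enumerate survey).foldl (pvStepA choices) total
  let total_list := total.items
  let answer := (PySem.List.pyRange 0 (PySem.List.len total_list) 2).foldl
    (fun answer i =>
      if (PySem.List.pyGetD total_list i (' ', 0)).2 ≥ (PySem.List.pyGetD total_list (i+1) (' ', 0)).2
      then answer ++ [(PySem.List.pyGetD total_list i (' ', 0)).1]
      else answer ++ [(PySem.List.pyGetD total_list (i+1) (' ', 0)).1]) answer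
  String.ofList answer

-- ===== PORT B =====
-- the loop body of B's inner 'for q, c in zip(survey, choices)' loop of net(a, b)
def pvNetStep (a b : Char) (s : Int) (qc : String × Int) : Int :=
  let q := qc.1
  let c := qc.2
  if 1 ≤ c ∧ c ≤ 7 ∧ c ≠ 4 then
    let letter := (if c < 4 then PySem.Str.pyGet? q 0 else PySem.Str.pyGet? q 1).getD ' '
    let w := if c < 4 then 4 - c else c - 4
    if letter == a then s + w
    else if letter == b then s - w
    else s
  else s

-- B's net(a, b): one full pass over zip(survey, choices) per pair
def pvNet (survey : List String) (choices : List Int) (a b : Char) : Int :=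
  (survey.zip choices).foldl (pvNetStep a b) 0

def solution_alt (survey : List String) (choices : List Int) : String :=
  String.ofList ([('R','T'), ('C','F'), ('J','M'), ('A','N')].map
    (fun p => if pvNet survey choices p.1 p.2 ≥ 0 then p.1 else p.2))

-- ===== PRECONDITION & SPEC =====
def pvLetters : List Char := ['R','T','C','F','J','M','A','N']

-- the indexed character exists and is one of the eight personality letters
def pvOk (q : String) (i : Int) : Bool :=
  match PySem.Str.pyGet? q i with
  | some c => pvLetters.contains c
  | none => false

-- Pre_ = exactly the inputs where A returns: choices covers every question
-- (else IndexError) and whenever a choice triggers a score, the accessed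
-- question character exists and is a valid personality letter (else
-- IndexError/KeyError).
def Pre_solution (survey : List String) (choices : List Int) : Prop :=
  survey.length ≤ choices.length ∧
  ∀ p ∈ survey.zip choices,
    ((p.2 = 1 ∨ p.2 = 2 ∨ p.2 = 3) → pvOk p.1 0 = true) ∧
    ((p.2 = 5 ∨ p.2 = 6 ∨ p.2 = 7) → pvOk p.1 1 = true)
instance (survey : List String) (choices : List Int) : Decidable (Pre_solution survey choices) := by
  unfold Pre_solution; infer_instance

def pvWitness_solution : List String × List Int := (["RT", "FC", "JM", "NA"], [1, 6, 4, 7])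

def Spec_solution (survey : List String) (choices : List Int) (out : String) : Prop := out = solution_alt survey choices
instance (survey : List String) (choices : List Int) (out : String) : Decidable (Spec_solution survey choices out) := by unfold Spec_solution; infer_instance

-- ===== CLAIM (what is proved, stated in full; the proofs are below) =====
def Claim_equal_solution : Prop := ∀ (survey : List String) (choices : List Int), Dom_solution survey choices → Pre_solution survey choices → Spec_solution survey choices (solution survey choices)

-- ===== LEMMAS AND PROOFS =====

-- proof-only shape of A's loop state
def pvMk8 (r t c f j m a n : Int) : PySem.Dict Char Int :=
  PySem.Dict.mk [('R',r),('T',t),('C',c),('F',f),('J',j),('M',m),('A',a),('N',n)]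

-- A's loop body with the current choice passed directly (choices[idx] resolved)
def pvStepA' (total : PySem.Dict Char Int) (qc : String × Int) : PySem.Dict Char Int :=
  let question := qc.1
  let currentChoice := qc.2
  let total :=
    if currentChoice == 1 || currentChoice == 7 then
      if currentChoice > 4 then total.modify ((PySem.Str.pyGet? question 1).getD ' ') 0 (· + 3)
      else total.modify ((PySem.Str.pyGet? question 0).getD ' ') 0 (· + 3)
    else total
  let total :=
    if currentChoice == 2 || currentChoice == 6 then
      if currentChoice > 4 then total.modify ((PySem.Str.pyGet? question 1).getD ' ') 0 (· + 2)
      else total.modify ((PySem.Str.pyGet? question 0).getD ' ') 0 (· + 2)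
    else total
  if currentChoice == 3 || currentChoice == 5 then
    if currentChoice > 4 then total.modify ((PySem.Str.pyGet? question 1).getD ' ') 0 (· + 1)
    else total.modify ((PySem.Str.pyGet? question 0).getD ' ') 0 (· + 1)
  else total

-- the question character the triggered update reads
def pvChosen (q : String) (c : Int) : Char :=
  (if c < 4 then PySem.Str.pyGet? q 0 else PySem.Str.pyGet? q 1).getD ' '

lemma pvA_enum_zip (xs : List String) : ∀ (cs pre : List Int) (st : PySem.Dict Char Int),
    xs.length ≤ cs.length →
    (PySem.List.enumerate xs (pre.length : Int)).foldl (pvStepA (pre ++ cs)) st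
      = (xs.zip cs).foldl pvStepA' st := by
  induction xs with
  | nil => intro cs pre st _; simp [PySem.List.enumerate]
  | cons q xs ih =>
    intro cs pre st h
    match cs with
    | [] => simp at h
    | c :: cs' =>
      rw [PySem.List.enumerate_cons]
      simp only [List.zip_cons_cons, List.foldl_cons]
      have hget : PySem.List.pyGetD (pre ++ c :: cs') ((pre.length : Int)) 0 = c := by
        simp [PySem.List.pyGetD_natCast, List.getD]
      have h1 : pvStepA (pre ++ c :: cs') st ((pre.length : Int), q) = pvStepA' st (q, c) := by
        simp only [pvStepA, pvStepA', hget]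
      rw [h1]
      have h2 : (pre.length : Int) + 1 = (((pre ++ [c]).length : Nat) : Int) := by
        simp
      rw [h2]
      have := ih cs' (pre ++ [c]) (pvStepA' st (q, c)) (by simpa using Nat.le_of_succ_le_succ h)
      simpa using this

lemma pvStepA'_skip (q : String) (c : Int)
    (h : ¬ (c = 1 ∨ c = 2 ∨ c = 3 ∨ c = 5 ∨ c = 6 ∨ c = 7)) (total : PySem.Dict Char Int) :
    pvStepA' total (q, c) = total := by
  have h1 : (c == 1 || c == 7) = false := by simp; omega
  have h2 : (c == 2 || c == 6) = false := by simp; omega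
  have h3 : (c == 3 || c == 5) = false := by simp; omega
  simp [pvStepA', h1, h2, h3]

lemma pvStepA'_trig (q : String) (c : Int)
    (h : c = 1 ∨ c = 2 ∨ c = 3 ∨ c = 5 ∨ c = 6 ∨ c = 7) (total : PySem.Dict Char Int) :
    pvStepA' total (q, c) = total.modify (pvChosen q c) 0 (· + |4 - c|) := by
  rcases h with rfl | rfl | rfl | rfl | rfl | rfl <;> norm_num [pvStepA', pvChosen]

lemma pvNetStep_skip (a b : Char) (q : String) (c : Int)
    (h : ¬ (c = 1 ∨ c = 2 ∨ c = 3 ∨ c = 5 ∨ c = 6 ∨ c = 7)) (s : Int) :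
    pvNetStep a b s (q, c) = s := by
  have h' : ¬ (1 ≤ c ∧ c ≤ 7 ∧ c ≠ 4) := by omega
  simp [pvNetStep, h']

lemma pvNetStep_trig (a b : Char) (q : String) (c : Int)
    (h : c = 1 ∨ c = 2 ∨ c = 3 ∨ c = 5 ∨ c = 6 ∨ c = 7) (s : Int) :
    pvNetStep a b s (q, c) =
      if pvChosen q c == a then s + |4 - c|
      else if pvChosen q c == b then s - |4 - c|
      else s := by
  rcases h with rfl | rfl | rfl | rfl | rfl | rfl <;> norm_num [pvNetStep, pvChosen]

lemma pvOk_chosen {q : String} {i : Int} (h : pvOk q i = true) :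
    (PySem.Str.pyGet? q i).getD ' ' ∈ pvLetters := by
  unfold pvOk at h
  cases hg : PySem.Str.pyGet? q i <;> rw [hg] at h
  · simp at h
  · simpa using h

lemma pvStep_shape (q : String) (c : Int) (r t cc f j m aa n : Int)
    (hok : ((c = 1 ∨ c = 2 ∨ c = 3) → pvOk q 0 = true) ∧
           ((c = 5 ∨ c = 6 ∨ c = 7) → pvOk q 1 = true)) :
    ∃ dR dT dC dF dJ dM dA dN : Int,
      pvStepA' (pvMk8 r t cc f j m aa n) (q, c)
        = pvMk8 (r+dR) (t+dT) (cc+dC) (f+dF) (j+dJ) (m+dM) (aa+dA) (n+dN) ∧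
      (∀ s : Int, pvNetStep 'R' 'T' s (q, c) = s + (dR - dT)) ∧
      (∀ s : Int, pvNetStep 'C' 'F' s (q, c) = s + (dC - dF)) ∧
      (∀ s : Int, pvNetStep 'J' 'M' s (q, c) = s + (dJ - dM)) ∧
      (∀ s : Int, pvNetStep 'A' 'N' s (q, c) = s + (dA - dN)) := by
  by_cases htrig : c = 1 ∨ c = 2 ∨ c = 3 ∨ c = 5 ∨ c = 6 ∨ c = 7
  case neg =>
    refine ⟨0,0,0,0,0,0,0,0, ?_, ?_, ?_, ?_, ?_⟩
    · rw [pvStepA'_skip q c htrig]; simp [pvMk8]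
    all_goals intro s; rw [pvNetStep_skip _ _ q c htrig]; ring
  case pos =>
    -- the chosen letter is a valid personality letter
    have hch : pvChosen q c ∈ pvLetters := by
      unfold pvChosen
      rcases htrig with rfl | rfl | rfl | rfl | rfl | rfl <;>
        norm_num <;>
        [exact pvOk_chosen (hok.1 (by omega)); exact pvOk_chosen (hok.1 (by omega));
         exact pvOk_chosen (hok.1 (by omega)); exact pvOk_chosen (hok.2 (by omega));
         exact pvOk_chosen (hok.2 (by omega)); exact pvOk_chosen (hok.2 (by omega))]
    rw [pvStepA'_trig q c htrig]
    have hB : ∀ (a b : Char) (x : Int), pvNetStep a b x (q, c) =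
        if pvChosen q c == a then x + |4 - c|
        else if pvChosen q c == b then x - |4 - c|
        else x := fun a b x => pvNetStep_trig a b q c htrig x
    generalize hg : pvChosen q c = ch at hch hB ⊢
    set s := |4 - c| with hs
    simp only [pvLetters, List.mem_cons, List.not_mem_nil, or_false] at hch
    rcases hch with rfl | rfl | rfl | rfl | rfl | rfl | rfl | rfl
    · exact ⟨s,0,0,0,0,0,0,0, by simp [pvMk8, PySem.Dict.modify, PySem.Dict.insert, PySem.Dict.getD, PySem.Dict.get?, PySem.Dict.contains],
        fun x => by rw [hB 'R' 'T' x]; simp; try ring,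
        fun x => by rw [hB 'C' 'F' x]; simp; try ring,
        fun x => by rw [hB 'J' 'M' x]; simp; try ring,
        fun x => by rw [hB 'A' 'N' x]; simp; try ring⟩
    · exact ⟨0,s,0,0,0,0,0,0, by simp [pvMk8, PySem.Dict.modify, PySem.Dict.insert, PySem.Dict.getD, PySem.Dict.get?, PySem.Dict.contains],
        fun x => by rw [hB 'R' 'T' x]; simp; try ring,
        fun x => by rw [hB 'C' 'F' x]; simp; try ring,
        fun x => by rw [hB 'J' 'M' x]; simp; try ring,
        fun x => by rw [hB 'A' 'N' x]; simp; try ring⟩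
    · exact ⟨0,0,s,0,0,0,0,0, by simp [pvMk8, PySem.Dict.modify, PySem.Dict.insert, PySem.Dict.getD, PySem.Dict.get?, PySem.Dict.contains],
        fun x => by rw [hB 'R' 'T' x]; simp; try ring,
        fun x => by rw [hB 'C' 'F' x]; simp; try ring,
        fun x => by rw [hB 'J' 'M' x]; simp; try ring,
        fun x => by rw [hB 'A' 'N' x]; simp; try ring⟩
    · exact ⟨0,0,0,s,0,0,0,0, by simp [pvMk8, PySem.Dict.modify, PySem.Dict.insert, PySem.Dict.getD, PySem.Dict.get?, PySem.Dict.contains],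
        fun x => by rw [hB 'R' 'T' x]; simp; try ring,
        fun x => by rw [hB 'C' 'F' x]; simp; try ring,
        fun x => by rw [hB 'J' 'M' x]; simp; try ring,
        fun x => by rw [hB 'A' 'N' x]; simp; try ring⟩
    · exact ⟨0,0,0,0,s,0,0,0, by simp [pvMk8, PySem.Dict.modify, PySem.Dict.insert, PySem.Dict.getD, PySem.Dict.get?, PySem.Dict.contains],
        fun x => by rw [hB 'R' 'T' x]; simp; try ring,
        fun x => by rw [hB 'C' 'F' x]; simp; try ring,
        fun x => by rw [hB 'J' 'M' x]; simp; try ring,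
        fun x => by rw [hB 'A' 'N' x]; simp; try ring⟩
    · exact ⟨0,0,0,0,0,s,0,0, by simp [pvMk8, PySem.Dict.modify, PySem.Dict.insert, PySem.Dict.getD, PySem.Dict.get?, PySem.Dict.contains],
        fun x => by rw [hB 'R' 'T' x]; simp; try ring,
        fun x => by rw [hB 'C' 'F' x]; simp; try ring,
        fun x => by rw [hB 'J' 'M' x]; simp; try ring,
        fun x => by rw [hB 'A' 'N' x]; simp; try ring⟩
    · exact ⟨0,0,0,0,0,0,s,0, by simp [pvMk8, PySem.Dict.modify, PySem.Dict.insert, PySem.Dict.getD, PySem.Dict.get?, PySem.Dict.contains],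
        fun x => by rw [hB 'R' 'T' x]; simp; try ring,
        fun x => by rw [hB 'C' 'F' x]; simp; try ring,
        fun x => by rw [hB 'J' 'M' x]; simp; try ring,
        fun x => by rw [hB 'A' 'N' x]; simp; try ring⟩
    · exact ⟨0,0,0,0,0,0,0,s, by simp [pvMk8, PySem.Dict.modify, PySem.Dict.insert, PySem.Dict.getD, PySem.Dict.get?, PySem.Dict.contains],
        fun x => by rw [hB 'R' 'T' x]; simp; try ring,
        fun x => by rw [hB 'C' 'F' x]; simp; try ring,
        fun x => by rw [hB 'J' 'M' x]; simp; try ring,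
        fun x => by rw [hB 'A' 'N' x]; simp; try ring⟩

lemma pvFold_shape : ∀ (ps : List (String × Int)),
    (∀ p ∈ ps, ((p.2 = 1 ∨ p.2 = 2 ∨ p.2 = 3) → pvOk p.1 0 = true) ∧
               ((p.2 = 5 ∨ p.2 = 6 ∨ p.2 = 7) → pvOk p.1 1 = true)) →
    ∀ (r t cc f j m aa n : Int),
      ∃ r' t' c' f' j' m' a' n' : Int,
        ps.foldl pvStepA' (pvMk8 r t cc f j m aa n) = pvMk8 r' t' c' f' j' m' a' n' ∧
        ps.foldl (pvNetStep 'R' 'T') (r-t) = r'-t' ∧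
        ps.foldl (pvNetStep 'C' 'F') (cc-f) = c'-f' ∧
        ps.foldl (pvNetStep 'J' 'M') (j-m) = j'-m' ∧
        ps.foldl (pvNetStep 'A' 'N') (aa-n) = a'-n' := by
  intro ps
  induction ps with
  | nil => intro _ r t cc f j m aa n; exact ⟨r,t,cc,f,j,m,aa,n, rfl, rfl, rfl, rfl, rfl⟩
  | cons p ps ih =>
    intro hps r t cc f j m aa n
    obtain ⟨q, c⟩ := p
    obtain ⟨dR,dT,dC,dF,dJ,dM,dA,dN, hA, hRT, hCF, hJM, hAN⟩ :=
      pvStep_shape q c r t cc f j m aa n (hps (q, c) (by simp))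
    obtain ⟨r',t',c',f',j',m',a',n', hA', hRT', hCF', hJM', hAN'⟩ :=
      ih (fun x hx => hps x (List.mem_cons_of_mem _ hx)) (r+dR) (t+dT) (cc+dC) (f+dF)
         (j+dJ) (m+dM) (aa+dA) (n+dN)
    refine ⟨r',t',c',f',j',m',a',n', ?_, ?_, ?_, ?_, ?_⟩
    · rw [List.foldl_cons, hA, hA']
    · rw [List.foldl_cons, hRT, show (r-t)+(dR-dT) = (r+dR)-(t+dT) from by ring, hRT']
    · rw [List.foldl_cons, hCF, show (cc-f)+(dC-dF) = (cc+dC)-(f+dF) from by ring, hCF']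
    · rw [List.foldl_cons, hJM, show (j-m)+(dJ-dM) = (j+dJ)-(m+dM) from by ring, hJM']
    · rw [List.foldl_cons, hAN, show (aa-n)+(dA-dN) = (aa+dA)-(n+dN) from by ring, hAN']

-- ===== VERDICT (by name: the statement is the Claim_ definition above) =====
theorem solution_spec : Claim_equal_solution := by
  unfold Claim_equal_solution
  intro survey choices _ hpre
  obtain ⟨hlen, hok⟩ := hpre
  unfold Spec_solution
  have h0A : PySem.Dict.ofList
      [('R',(0:Int)),('T',0),('C',0),('F',0),('J',0),('M',0),('A',0),('N',0)]
      = pvMk8 0 0 0 0 0 0 0 0 := by decide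
  have henum : (PySem.List.enumerate survey).foldl (pvStepA choices) (pvMk8 0 0 0 0 0 0 0 0)
      = (survey.zip choices).foldl pvStepA' (pvMk8 0 0 0 0 0 0 0 0) := by
    have := pvA_enum_zip survey choices [] (pvMk8 0 0 0 0 0 0 0 0) hlen
    simpa using this
  obtain ⟨r',t',c',f',j',m',a',n', hA, hRT, hCF, hJM, hAN⟩ :=
    pvFold_shape (survey.zip choices) hok 0 0 0 0 0 0 0 0
  have hRT' : pvNet survey choices 'R' 'T' = r'-t' := by
    unfold pvNet; rw [show (0:Int) = 0 - 0 from rfl, hRT]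
  have hCF' : pvNet survey choices 'C' 'F' = c'-f' := by
    unfold pvNet; rw [show (0:Int) = 0 - 0 from rfl, hCF]
  have hJM' : pvNet survey choices 'J' 'M' = j'-m' := by
    unfold pvNet; rw [show (0:Int) = 0 - 0 from rfl, hJM]
  have hAN' : pvNet survey choices 'A' 'N' = a'-n' := by
    unfold pvNet; rw [show (0:Int) = 0 - 0 from rfl, hAN]
  simp only [solution, solution_alt, h0A, henum, hA]
  by_cases h1 : t' ≤ r' <;> by_cases h2 : f' ≤ c' <;> by_cases h3 : m' ≤ j' <;>
    by_cases h4 : n' ≤ a' <;>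
    norm_num [hRT', hCF', hJM', hAN', pvMk8, PySem.List.len, PySem.List.pyGetD, PySem.List.pyIdx?,
      List.getElem_cons_succ, List.getElem_cons_zero, h1, h2, h3, h4, sub_nonneg,
      show Int.toNat 7 = 7 from rfl, show Int.toNat 6 = 6 from rfl,
      show Int.toNat 5 = 5 from rfl, show Int.toNat 4 = 4 from rfl,
      show Int.toNat 3 = 3 from rfl, show Int.toNat 2 = 2 from rfl,
      show Int.toNat 1 = 1 from rfl, show Int.toNat 0 = 0 from rfl,
      show PySem.List.pyRange 0 8 2 = [0,2,4,6] from by decide]
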